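-- pv_equiv track=rewrite | github.com/javidaslan/community_detection_framework | metrics.py | generate_confusion_matrix
-- ===== SOURCE A (Python) =====
-- def list_compare(list1, list2):
--     """
--     Find common elements of lists
--     """
--     return len([elm for elm in list1 if elm in list2])
--
-- def generate_confusion_matrix(real_communities, found_communities):
--     """
--     Confusion matrix N:
--         rows - 'real' communities
--         columns - found communities
--         N[ij] - number of nodes in real community i which also appears in found community j
--     """
--     N_ij_s = []
--     for r_community in real_communities:
--         n_ij = []
--         for f_community in found_communities:
--             n_ij.append(list_compare(r_community, f_community))
--         N_ij_s.append(n_ij)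
--
--     return N_ij_s
-- ===== SOURCE B (Python) =====
-- def generate_confusion_matrix(real_communities, found_communities):
--     # Inverted index: node -> increasing list of found-community indices containing it.
--     index = {}
--     j = 0
--     for f_community in found_communities:
--         for node in f_community:
--             js = index.setdefault(node, [])
--             if not js or js[-1] != j:
--                 js.append(j)
--         j += 1
--     n_found = len(found_communities)
--     result = []
--     for r_community in real_communities:
--         row = [0] * n_found
--         for node in r_community:
--             for k in index.get(node, ()):
--                 row[k] += 1
--         result.append(row)
--     return result
-- ===== Notes on version B (the rewrite author's own statement) =====
-- stated objective: faster
-- what changed: Replaced the nested scan (for every real community, for every found community, a membership scan of the found community) by an inverted index built once from the found communities mapping node -> list of found-community indices; each row is then filled in one pass over the real community's nodes.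
import Mathlib
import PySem

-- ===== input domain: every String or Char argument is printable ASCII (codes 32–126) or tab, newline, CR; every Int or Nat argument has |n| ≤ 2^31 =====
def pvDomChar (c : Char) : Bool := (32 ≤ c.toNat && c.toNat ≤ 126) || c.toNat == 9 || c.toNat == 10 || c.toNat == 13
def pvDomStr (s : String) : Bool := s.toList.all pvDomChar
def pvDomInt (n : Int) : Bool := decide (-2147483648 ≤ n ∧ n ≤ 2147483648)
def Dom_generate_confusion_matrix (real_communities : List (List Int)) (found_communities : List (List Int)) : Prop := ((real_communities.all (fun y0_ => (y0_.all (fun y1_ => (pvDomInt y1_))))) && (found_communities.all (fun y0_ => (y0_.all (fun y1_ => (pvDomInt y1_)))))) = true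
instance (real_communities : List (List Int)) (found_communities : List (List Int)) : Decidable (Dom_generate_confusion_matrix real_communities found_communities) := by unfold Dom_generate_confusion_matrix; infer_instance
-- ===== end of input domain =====

-- B replaces A's nested membership scans by an inverted index (node -> found-community
-- indices) built once, then fills each row in one pass over the real community's nodes.

-- ===== PORT A =====
-- len([elm for elm in list1 if elm in list2])
def list_compare (list1 : List Int) (list2 : List Int) : Int :=
  ((list1.filter (fun elm => decide (elm ∈ list2))).length : Int)

def generate_confusion_matrix (real_communities : List (List Int)) (found_communities : List (List Int)) : List (List Int) :=
  real_communities.foldl (fun N_ij_s r_community =>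
    N_ij_s ++ [found_communities.foldl (fun n_ij f_community =>
      n_ij ++ [list_compare r_community f_community]) []]) []

-- ===== PORT B =====
-- inner body of the index-building loop: js = index.setdefault(node, []);
-- if not js or js[-1] != j: js.append(j)
def pvStep (j : Nat) (d : PySem.Dict Int (List Nat)) (node : Int) : PySem.Dict Int (List Nat) :=
  let js := d.getD node []
  if js = [] ∨ js.getLast? ≠ some j then d.insert node (js ++ [j]) else d

-- index = {}; j = 0; for f_community in found: (inner loop); j += 1
def pvBuildIndex (found_communities : List (List Int)) : PySem.Dict Int (List Nat) :=
  (found_communities.foldl (fun s f_community => (s.1 + 1, f_community.foldl (pvStep s.1) s.2))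
    ((0 : Nat), PySem.Dict.empty)).2

-- row[k] += 1  (k is always a valid position into row: index entries are positions into found_communities)
def pvBump (row : List Int) (k : Nat) : List Int := row.set k (row.getD k 0 + 1)

def generate_confusion_matrix_alt (real_communities : List (List Int)) (found_communities : List (List Int)) : List (List Int) :=
  let index := pvBuildIndex found_communities
  real_communities.foldl (fun result r_community =>
    result ++ [r_community.foldl (fun row node => (index.getD node []).foldl pvBump row)
      (List.replicate found_communities.length 0)]) []

-- ===== PRECONDITION & SPEC =====
def Spec_generate_confusion_matrix (real_communities : List (List Int)) (found_communities : List (List Int)) (out : List (List Int)) : Prop := out = generate_confusion_matrix_alt real_communities found_communities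
instance (real_communities : List (List Int)) (found_communities : List (List Int)) (out : List (List Int)) : Decidable (Spec_generate_confusion_matrix real_communities found_communities out) := by unfold Spec_generate_confusion_matrix; infer_instance

-- ===== CLAIM (what is proved, stated in full; the proofs are below) =====
def Claim_equal_generate_confusion_matrix : Prop := ∀ (real_communities : List (List Int)) (found_communities : List (List Int)), Dom_generate_confusion_matrix real_communities found_communities → Spec_generate_confusion_matrix real_communities found_communities (generate_confusion_matrix real_communities found_communities)

-- ===== LEMMAS AND PROOFS =====

-- specification of the inverted index entry for `node`: the indices j, j+1, … of the
-- communities of `fs` that contain `node`, in increasing order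
def idxSpec (node : Int) : Nat → List (List Int) → List Nat
  | _, [] => []
  | j, f :: fs => (if node ∈ f then [j] else []) ++ idxSpec node (j+1) fs

theorem idxSpec_lb (node : Int) : ∀ (fs : List (List Int)) (j x : Nat), x ∈ idxSpec node j fs → j ≤ x := by
  intro fs
  induction fs with
  | nil => intro j x hx; simp [idxSpec] at hx
  | cons f fs ih =>
    intro j x hx
    simp only [idxSpec, List.mem_append] at hx
    rcases hx with hx | hx
    · split at hx <;> simp_all
    · exact Nat.le_of_succ_le (ih (j+1) x hx)

theorem idxSpec_ub (node : Int) : ∀ (fs : List (List Int)) (j x : Nat), x ∈ idxSpec node j fs → x < j + fs.length := by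
  intro fs
  induction fs with
  | nil => intro j x hx; simp [idxSpec] at hx
  | cons f fs ih =>
    intro j x hx
    simp only [idxSpec, List.mem_append] at hx
    rcases hx with hx | hx
    · split at hx <;> simp_all
    · have := ih (j+1) x hx; simp; omega

theorem idxSpec_count (node : Int) : ∀ (fs : List (List Int)) (j k : Nat) (hk : k < fs.length),
    (idxSpec node j fs).count (j + k) = if node ∈ fs[k] then 1 else 0 := by
  intro fs
  induction fs with
  | nil => intro j k hk; simp at hk
  | cons f fs ih =>
    intro j k hk
    have hlow : (idxSpec node (j+1) fs).count j = 0 := by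
      rw [List.count_eq_zero]
      intro h
      exact absurd (idxSpec_lb node fs (j+1) j h) (by omega)
    cases k with
    | zero =>
      simp only [idxSpec, List.count_append, List.getElem_cons_zero, Nat.add_zero]
      split <;> simp [hlow]
    | succ k =>
      have hk' : k < fs.length := by simpa using hk
      have := ih (j+1) k hk'
      simp only [idxSpec, List.count_append, List.getElem_cons_succ]
      have hne : (if node ∈ f then [j] else []).count (j + (k+1)) = 0 := by
        split <;> simp <;> omega
      rw [hne]
      have : j + (k + 1) = (j + 1) + k := by omega
      rw [this, ih (j+1) k hk']
      simp

-- the inner loop over one found community f (index j) appends j to the entry of exactly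
-- the nodes of f, once each
theorem pvStep_fold (j : Nat) (d0 : PySem.Dict Int (List Nat))
    (hb : ∀ node x, x ∈ d0.getD node [] → x < j) :
    ∀ (f seen : List Int) (d : PySem.Dict Int (List Nat)),
    (∀ node, d.getD node [] = d0.getD node [] ++ (if node ∈ seen then [j] else [])) →
    ∀ node, (f.foldl (pvStep j) d).getD node [] =
      d0.getD node [] ++ (if node ∈ seen ∨ node ∈ f then [j] else []) := by
  intro f
  induction f with
  | nil =>
    intro seen d hd node
    simpa using hd node
  | cons n f ih =>
    intro seen d hd node
    simp only [List.foldl_cons]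
    by_cases hn : n ∈ seen
    · have hskip : pvStep j d n = d := by
        unfold pvStep
        have hjs : d.getD n [] = d0.getD n [] ++ [j] := by rw [hd n, if_pos hn]
        have hlast : (d.getD n []).getLast? = some j := by
          rw [hjs]; simp
        simp [hjs]
      rw [hskip]
      have := ih seen d hd node
      rw [this]
      by_cases hnode : node ∈ seen <;> by_cases hnf : node ∈ f <;>
        simp_all [List.mem_cons] <;> aesop
    · have hjs : d.getD n [] = d0.getD n [] := by rw [hd n, if_neg hn]; simp
      have hlast : ¬ (d.getD n []).getLast? = some j := by
        rw [hjs]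
        intro h
        have hmem : j ∈ d0.getD n [] := List.mem_of_getLast? h
        exact absurd (hb n j hmem) (by omega)
      have hins : pvStep j d n = d.insert n (d.getD n [] ++ [j]) := by
        unfold pvStep; simp [hlast]
      rw [hins]
      have hd' : ∀ node, (d.insert n (d.getD n [] ++ [j])).getD node [] =
          d0.getD node [] ++ (if node ∈ seen ++ [n] then [j] else []) := by
        intro node
        by_cases hne : node = n
        · subst hne
          rw [PySem.Dict.getD_insert_self, hjs]
          simp
        · rw [PySem.Dict.getD_insert, if_neg hne, hd node]
          have : (node ∈ seen ++ [n]) ↔ node ∈ seen := by simp [hne]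
          simp only [this]
      have := ih (seen ++ [n]) _ hd' node
      rw [this]
      by_cases hnode : node ∈ seen <;> by_cases hnf : node ∈ f <;>
        by_cases hnn : node = n <;> simp_all [List.mem_cons]

theorem pvBuildIndex_outer :
    ∀ (found : List (List Int)) (j : Nat) (d : PySem.Dict Int (List Nat)),
    (∀ node x, x ∈ d.getD node [] → x < j) →
    ∀ node, ((found.foldl (fun s f => (s.1 + 1, f.foldl (pvStep s.1) s.2)) (j, d)).2).getD node [] =
      d.getD node [] ++ idxSpec node j found := by
  intro found
  induction found with
  | nil => intro j d _ node; simp [idxSpec]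
  | cons f fs ih =>
    intro j d hb node
    simp only [List.foldl_cons]
    have hstep : ∀ node, (f.foldl (pvStep j) d).getD node [] =
        d.getD node [] ++ (if node ∈ f then [j] else []) := by
      intro node
      have := pvStep_fold j d hb f [] d (by intro node; simp) node
      simpa using this
    have hb' : ∀ node x, x ∈ (f.foldl (pvStep j) d).getD node [] → x < j + 1 := by
      intro node x hx
      rw [hstep node] at hx
      simp only [List.mem_append] at hx
      rcases hx with hx | hx
      · exact Nat.lt_succ_of_lt (hb node x hx)
      · split at hx <;> simp_all
    have := ih (j+1) _ hb' node
    rw [this, hstep node, idxSpec]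
    simp [List.append_assoc]

theorem pvBuildIndex_getD (found : List (List Int)) (node : Int) :
    (pvBuildIndex found).getD node [] = idxSpec node 0 found := by
  unfold pvBuildIndex
  have := pvBuildIndex_outer found 0 PySem.Dict.empty (by intro node x hx; simp [PySem.Dict.getD_empty] at hx) node
  simpa [PySem.Dict.getD_empty] using this

theorem pvBump_length (row : List Int) (k : Nat) : (pvBump row k).length = row.length := by
  simp [pvBump]

theorem pvBump_getD (row : List Int) (i k : Nat) (hi : i < row.length) :
    (pvBump row i).getD k 0 = row.getD k 0 + (if i = k then 1 else 0) := by
  unfold pvBump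
  by_cases h : i = k
  · subst h
    simp [List.getD, hi]
  · simp [List.getD, List.getElem?_set_ne h, h]

theorem foldl_pvBump_length : ∀ (l : List Nat) (row : List Int),
    (l.foldl pvBump row).length = row.length := by
  intro l
  induction l with
  | nil => intro row; rfl
  | cons i l ih => intro row; rw [List.foldl_cons, ih, pvBump_length]

theorem foldl_pvBump_getD : ∀ (l : List Nat) (row : List Int),
    (∀ x ∈ l, x < row.length) → ∀ k,
    (l.foldl pvBump row).getD k 0 = row.getD k 0 + (l.count k : Int) := by
  intro l
  induction l with
  | nil => intro row _ k; simp
  | cons i l ih =>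
    intro row hl k
    rw [List.foldl_cons, ih _ (by intro x hx; rw [pvBump_length]; exact hl x (List.mem_cons_of_mem _ hx)) k,
      pvBump_getD row i k (hl i (List.mem_cons_self))]
    rw [List.count_cons]
    by_cases h : i = k <;> simp [h, beq_iff_eq] <;> push_cast <;> ring

theorem row_fold_length (found : List (List Int)) : ∀ (r : List Int) (row : List Int),
    (r.foldl (fun row node => ((pvBuildIndex found).getD node []).foldl pvBump row) row).length = row.length := by
  intro r
  induction r with
  | nil => intro row; rfl
  | cons n r ih => intro row; rw [List.foldl_cons, ih, foldl_pvBump_length]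

theorem row_fold_getD (found : List (List Int)) :
    ∀ (r : List Int) (row : List Int), row.length = found.length → ∀ (k : Nat) (hk : k < found.length),
    (r.foldl (fun row node => ((pvBuildIndex found).getD node []).foldl pvBump row) row).getD k 0 =
      row.getD k 0 + (r.countP (fun node => decide (node ∈ found[k])) : Int) := by
  intro r
  induction r with
  | nil => intro row _ k _; simp
  | cons n r ih =>
    intro row hrow k hk
    rw [List.foldl_cons]
    have hlen : (((pvBuildIndex found).getD n []).foldl pvBump row).length = found.length := by
      rw [foldl_pvBump_length]; exact hrow
    rw [ih _ hlen k hk]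
    have hbound : ∀ x ∈ (pvBuildIndex found).getD n [], x < row.length := by
      intro x hx
      rw [pvBuildIndex_getD] at hx
      have := idxSpec_ub n found 0 x hx
      omega
    rw [foldl_pvBump_getD _ row hbound k]
    rw [pvBuildIndex_getD]
    have hcnt : (idxSpec n 0 found).count k = if n ∈ found[k] then 1 else 0 := by
      have := idxSpec_count n found 0 k hk
      simpa using this
    rw [hcnt, List.countP_cons]
    by_cases h : n ∈ found[k] <;> simp [h] <;> push_cast <;> ring

-- folding "append a singleton" is mapping
theorem foldl_append_single {α β : Type} (g : α → β) :
    ∀ (l : List α) (acc : List β), l.foldl (fun acc x => acc ++ [g x]) acc = acc ++ l.map g := by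
  intro l
  induction l with
  | nil => intro acc; simp
  | cons x l ih => intro acc; rw [List.foldl_cons, ih]; simp

theorem row_eq (found : List (List Int)) (r : List Int) :
    found.foldl (fun n_ij f_community => n_ij ++ [list_compare r f_community]) [] =
    r.foldl (fun row node => ((pvBuildIndex found).getD node []).foldl pvBump row)
      (List.replicate found.length 0) := by
  rw [foldl_append_single (fun f => list_compare r f) found []]
  apply List.ext_getElem
  · rw [row_fold_length]
    simp
  · intro k hk1 hk2
    have hkf : k < found.length := by simpa using hk1
    have hrep : (List.replicate found.length (0 : Int)).length = found.length := by simp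
    have hgd := row_fold_getD found r (List.replicate found.length 0) hrep k hkf
    have h1 : (r.foldl (fun row node => ((pvBuildIndex found).getD node []).foldl pvBump row)
        (List.replicate found.length 0))[k] =
        (r.foldl (fun row node => ((pvBuildIndex found).getD node []).foldl pvBump row)
        (List.replicate found.length 0)).getD k 0 := by
      rw [List.getD_eq_getElem?_getD, List.getElem?_eq_getElem hk2]
      rfl
    rw [h1, hgd]
    have hrep0 : (List.replicate found.length (0 : Int)).getD k 0 = 0 := by
      rw [List.getD_eq_getElem?_getD, List.getElem?_eq_getElem (by simpa using hkf)]
      simp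
    rw [hrep0]
    simp only [List.nil_append, List.getElem_map, list_compare, List.countP_eq_length_filter]
    push_cast
    ring

-- ===== VERDICT (by name: the statement is the Claim_ definition above) =====
theorem generate_confusion_matrix_spec : Claim_equal_generate_confusion_matrix := by
  intro real found _
  unfold Spec_generate_confusion_matrix generate_confusion_matrix generate_confusion_matrix_alt
  rw [foldl_append_single (fun r => found.foldl (fun n_ij f => n_ij ++ [list_compare r f]) []) real [],
    foldl_append_single (fun r => r.foldl (fun row node => ((pvBuildIndex found).getD node []).foldl pvBump row) (List.replicate found.length 0)) real []]
  simp only [List.nil_append]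
  apply List.map_congr_left
  intro r _
  exact row_eq found r
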